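-- pv_equiv track=rewrite | github.com/MustafaAmin06/Verity | scraping/extractors.py | _is_consent_text
-- ===== SOURCE A (Python) =====
-- _CONSENT_TEXT_SIGNATURES = (
--     "manage cookie",
--     "cookie preferences",
--     "cookie settings",
--     "we use cookies",
--     "this site uses cookies",
--     "this website uses cookies",
--     "types of cookies",
--     "consent preferences",
--     "privacy preferences",
--     "manage your privacy",
--     "manage preferences",
--     "strictly necessary",
--     "performance cookies",
--     "functional cookies",
--     "targeting cookies",
--     "advertising cookies",
--     "analytics cookies",
--     "third-party cookies",
--     "cookie policy",
--     "save preferences",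
-- )
--
-- def _is_consent_text(text: str | None) -> bool:
--     if not text:
--         return False
--     lowered = text.lower()
--     prefix = lowered[:200]
--     if sum(1 for signature in _CONSENT_TEXT_SIGNATURES if signature in prefix) >= 2:
--         return True
--     total_hits = sum(1 for signature in _CONSENT_TEXT_SIGNATURES if signature in lowered)
--     return total_hits >= 3 and len(text) < 3000
-- ===== SOURCE B (Python) =====
-- _CONSENT_TEXT_SIGNATURES = (
--     "manage cookie",
--     "cookie preferences",
--     "cookie settings",
--     "we use cookies",
--     "this site uses cookies",
--     "this website uses cookies",
--     "types of cookies",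
--     "consent preferences",
--     "privacy preferences",
--     "manage your privacy",
--     "manage preferences",
--     "strictly necessary",
--     "performance cookies",
--     "functional cookies",
--     "targeting cookies",
--     "advertising cookies",
--     "analytics cookies",
--     "third-party cookies",
--     "cookie policy",
--     "save preferences",
-- )
--
--
-- def _is_consent_text(text):
--     # Naive multi-pattern matcher: ONE left-to-right scan over the text
--     # positions, recording the first occurrence position of each signature;
--     # no substring containment tests or slices at all.
--     if not text:
--         return False
--     lowered = text.lower()
--     first = [None] * len(_CONSENT_TEXT_SIGNATURES)
--     for i in range(len(lowered)):
--         for k, sig in enumerate(_CONSENT_TEXT_SIGNATURES):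
--             if first[k] is None and lowered.startswith(sig, i):
--                 first[k] = i
--     prefix_hits = 0
--     total_hits = 0
--     for sig, start in zip(_CONSENT_TEXT_SIGNATURES, first):
--         if start is not None:
--             total_hits += 1
--             if start + len(sig) <= 200:
--                 prefix_hits += 1
--     if prefix_hits >= 2:
--         return True
--     return total_hits >= 3 and len(text) < 3000
-- ===== Notes on version B (the rewrite author's own statement) =====
-- stated objective: alternative
-- what changed: Replaces A's per-signature substring containment tests (and the lowered[:200] slice) by a naive multi-pattern matcher: one left-to-right scan over the text positions that records each signature's first occurrence index in a table, from which both the prefix test (first + len(sig) <= 200) and the total count are read off.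
import Mathlib
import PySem

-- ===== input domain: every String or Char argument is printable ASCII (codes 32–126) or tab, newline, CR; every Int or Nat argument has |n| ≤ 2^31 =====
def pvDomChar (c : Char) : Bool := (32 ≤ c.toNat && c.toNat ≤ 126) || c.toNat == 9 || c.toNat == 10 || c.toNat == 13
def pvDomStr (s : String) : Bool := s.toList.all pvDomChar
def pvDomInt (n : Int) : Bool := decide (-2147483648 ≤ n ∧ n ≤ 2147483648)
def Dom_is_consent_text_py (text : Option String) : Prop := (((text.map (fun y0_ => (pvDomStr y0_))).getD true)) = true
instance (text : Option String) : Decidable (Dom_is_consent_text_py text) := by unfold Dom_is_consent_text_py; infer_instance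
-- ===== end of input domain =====

-- B replaces A's per-signature substring tests and prefix slice by a naive multi-pattern
-- matcher: one left-to-right scan over the text positions recording each signature's first
-- occurrence (objective: alternative algorithm, same asymptotic cost).

def consentSigs : List String :=
  ["manage cookie", "cookie preferences", "cookie settings", "we use cookies",
   "this site uses cookies", "this website uses cookies", "types of cookies",
   "consent preferences", "privacy preferences", "manage your privacy",
   "manage preferences", "strictly necessary", "performance cookies",
   "functional cookies", "targeting cookies", "advertising cookies",
   "analytics cookies", "third-party cookies", "cookie policy", "save preferences"]

-- ===== PORT A =====
def is_consent_text_py (text : Option String) : Bool :=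
  match text with
  | none => false
  | some t =>
    if PySem.Str.len t = 0 then false
    else
      let lowered := PySem.Str.lower t
      let pfx := PySem.Str.slice lowered none (some 200)
      if consentSigs.foldl (fun acc sig => if PySem.Str.isIn sig pfx then acc + 1 else acc) (0 : Int) ≥ 2 then
        true
      else
        let totalHits := consentSigs.foldl (fun acc sig => if PySem.Str.isIn sig lowered then acc + 1 else acc) (0 : Int)
        decide (totalHits ≥ 3 ∧ PySem.Str.len t < 3000)

-- ===== PORT B =====
def is_consent_text_py_alt (text : Option String) : Bool :=
  match text with
  | none => false
  | some t =>
    if PySem.Str.len t = 0 then false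
    else
      let lowered := PySem.Str.lower t
      -- first = [None] * len(_CONSENT_TEXT_SIGNATURES)
      let first0 : List (Option Int) := List.replicate consentSigs.length none
      -- for i in range(len(lowered)): for k, sig in enumerate(SIGS): …
      let first := (PySem.List.pyRange 0 (PySem.Str.len lowered) 1).foldl
        (fun st i =>
          (PySem.List.enumerate consentSigs 0).foldl
            (fun st p =>
              -- lowered.startswith(sig, i) ported by hand as prefix-of-drop; exact here since 0 ≤ i
              if (PySem.List.pyGetD st p.1 none).isNone
                  && p.2.toList.isPrefixOf (lowered.toList.drop i.toNat)
              then PySem.List.pySetD st p.1 (some i) else st)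
            st)
        first0
      let hits := (consentSigs.zip first).foldl
        (fun (acc : Int × Int) p =>
          match p.2 with
          | some start =>
            (if start + PySem.Str.len p.1 ≤ 200 then acc.1 + 1 else acc.1, acc.2 + 1)
          | none => acc)
        ((0 : Int), (0 : Int))
      if hits.1 ≥ 2 then true
      else decide (hits.2 ≥ 3 ∧ PySem.Str.len t < 3000)

-- ===== PRECONDITION & SPEC =====
def Spec_is_consent_text_py (text : Option String) (out : Bool) : Prop := out = is_consent_text_py_alt text
instance (text : Option String) (out : Bool) : Decidable (Spec_is_consent_text_py text out) := by unfold Spec_is_consent_text_py; infer_instance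

-- ===== CLAIM (what is proved, stated in full; the proofs are below) =====
def Claim_equal_is_consent_text_py : Prop := ∀ (text : Option String), Dom_is_consent_text_py text → Spec_is_consent_text_py text (is_consent_text_py text)

-- ===== LEMMAS AND PROOFS =====

-- B's scan state, solved: first occurrence of sig among positions < m
def fuScan (low : List Char) (m : Nat) (sig : String) : Option Int :=
  if PySem.Chars.find low sig.toList ≠ -1 ∧ PySem.Chars.find low sig.toList < (m : Int)
  then some (PySem.Chars.find low sig.toList) else none

theorem isIn_take_iff (s sig : List Char) (n : Nat) :
    PySem.Chars.isIn sig (s.take n) = true ↔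
      (PySem.Chars.find s sig ≠ -1 ∧ PySem.Chars.find s sig + sig.length ≤ n) := by
  constructor
  · intro h
    rw [PySem.Chars.isIn_iff_infix] at h
    obtain ⟨t1, t2, ht⟩ := h
    have hpre : sig <+: (s.take n).drop t1.length := by
      rw [← ht]; simp
    have hlen : t1.length + sig.length ≤ n := by
      have : t1.length + sig.length ≤ (s.take n).length := by
        rw [← ht]; simp
      simpa using le_trans this (by simp)
    have hdrop : sig <+: s.drop t1.length := by
      have := hpre
      rw [List.drop_take] at this
      exact this.trans (List.take_prefix _ _)
    have hin : PySem.Chars.isIn sig s = true :=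
      (PySem.Chars.exists_prefix_drop_iff_isIn sig s).mp ⟨_, hdrop⟩
    have hne : PySem.Chars.find s sig ≠ -1 := by
      rw [PySem.Chars.find_ne_neg_one_iff, ← PySem.Chars.isIn_iff_infix]; exact hin
    have hnn : 0 ≤ PySem.Chars.find s sig := by
      have := PySem.Chars.neg_one_le_find s sig; omega
    have hspec := PySem.Chars.find_spec (s := s) (sub := sig) hnn
    have hle : (PySem.Chars.find s sig).toNat ≤ t1.length := by
      by_contra hlt
      exact hspec.2 t1.length (by omega) hdrop
    refine ⟨hne, ?_⟩
    have : (PySem.Chars.find s sig).toNat + sig.length ≤ n := by omega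
    omega
  · rintro ⟨hne, hle⟩
    have hnn : 0 ≤ PySem.Chars.find s sig := by
      have := PySem.Chars.neg_one_le_find s sig; omega
    have hspec := PySem.Chars.find_spec (s := s) (sub := sig) hnn
    set j := (PySem.Chars.find s sig).toNat with hj
    have hjn : j + sig.length ≤ n := by omega
    have hpre : sig <+: (s.take n).drop j := by
      rw [List.drop_take]
      exact List.prefix_take_iff.mpr ⟨hspec.1, by omega⟩
    exact (PySem.Chars.exists_prefix_drop_iff_isIn sig (s.take n)).mp ⟨_, hpre⟩

theorem isIn_total_eq (low sl : List Char) :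
    PySem.Chars.isIn sl low = !decide (PySem.Chars.find low sl = -1) := by
  rw [Bool.eq_iff_iff]
  simp only [Bool.not_eq_true', decide_eq_false_iff_not]
  rw [PySem.Chars.isIn_iff_infix, ← PySem.Chars.find_ne_neg_one_iff]

theorem find_toNat_lt (low : List Char) (sig : String) (hne : sig.toList ≠ [])
    (h1 : PySem.Chars.find low sig.toList ≠ -1) :
    (PySem.Chars.find low sig.toList).toNat < low.length := by
  have hge := PySem.Chars.neg_one_le_find low sig.toList
  have hnn : 0 ≤ PySem.Chars.find low sig.toList := by omega
  have hspec := PySem.Chars.find_spec (s := low) (sub := sig.toList) hnn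
  rcases hspec.1 with ⟨t, ht⟩
  have hl := congrArg List.length ht
  rw [List.length_append, List.length_drop] at hl
  have hlen : 0 < sig.toList.length := List.length_pos_iff.mpr hne
  omega

-- the inner enumerate-fold updates each slot independently: it is a zipWith
theorem inner_fold_eq (low : List Char) (i : Int) :
    ∀ (sigs : List String) (pre suf : List (Option Int)), suf.length = sigs.length →
    (PySem.List.enumerate sigs (pre.length : Int)).foldl
      (fun st p =>
        if (PySem.List.pyGetD st p.1 none).isNone
            && p.2.toList.isPrefixOf (low.drop i.toNat)
        then PySem.List.pySetD st p.1 (some i) else st)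
      (pre ++ suf)
    = pre ++ List.zipWith
        (fun sig v => if Option.isNone v && sig.toList.isPrefixOf (low.drop i.toNat) then some i else v)
        sigs suf := by
  intro sigs
  induction sigs with
  | nil =>
    intro pre suf h
    simp at h
    simp [h, PySem.List.enumerate]
  | cons x xs ih =>
    intro pre suf h
    cases suf with
    | nil => simp at h
    | cons v suf' =>
      simp at h
      rw [PySem.List.enumerate_cons, List.foldl_cons]
      have hget : PySem.List.pyGetD (pre ++ v :: suf') (pre.length : Int) none = v := by
        rw [PySem.List.pyGetD_natCast]
        simp [List.getD]
      have hset : PySem.List.pySetD (pre ++ v :: suf') (pre.length : Int) (some i) = pre ++ some i :: suf' := by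
        rw [PySem.List.pySetD_natCast]
        rw [List.set_append_right _ _ (le_refl _)]
        simp
      by_cases hc : (Option.isNone v && x.toList.isPrefixOf (low.drop i.toNat)) = true
      · simp only [hget, hc, if_pos, List.zipWith_cons_cons]
        rw [hset]
        have := ih (pre ++ [some i]) suf' h
        rw [show ((pre.length : Int) + 1) = ((pre ++ [some i]).length : Int) by simp]
        simp only [List.append_assoc, List.cons_append, List.nil_append] at this ⊢
        rw [this]
      · simp only [hget, hc, List.zipWith_cons_cons]
        rw [if_neg (by simp_all)]
        have := ih (pre ++ [v]) suf' h
        rw [show ((pre.length : Int) + 1) = ((pre ++ [v]).length : Int) by simp]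
        simp only [List.append_assoc, List.cons_append, List.nil_append] at this ⊢
        rw [this]
        simp

-- B's recorded value for one signature advances by one position
theorem fuScan_step (low : List Char) (m : Nat) (sig : String) :
    (if Option.isNone (fuScan low m sig) && sig.toList.isPrefixOf (low.drop m) then some (m : Int)
     else fuScan low m sig) = fuScan low (m + 1) sig := by
  have hge := PySem.Chars.neg_one_le_find low sig.toList
  by_cases h1 : PySem.Chars.find low sig.toList ≠ -1 ∧ PySem.Chars.find low sig.toList < (m : Int)
  · simp [fuScan, h1, show PySem.Chars.find low sig.toList < (m:Int)+1 by omega]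
  · have hnone : fuScan low m sig = none := by simp [fuScan, h1]
    rw [hnone]
    by_cases hp : sig.toList.isPrefixOf (low.drop m) = true
    · -- a match at position m, and none among earlier positions: find = m
      have hpre : sig.toList <+: low.drop m := List.isPrefixOf_iff_prefix.mp hp
      have hin : PySem.Chars.isIn sig.toList low = true :=
        (PySem.Chars.exists_prefix_drop_iff_isIn sig.toList low).mp ⟨m, hpre⟩
      have hne : PySem.Chars.find low sig.toList ≠ -1 := by
        rw [PySem.Chars.find_ne_neg_one_iff, ← PySem.Chars.isIn_iff_infix]; exact hin
      have hnn : 0 ≤ PySem.Chars.find low sig.toList := by omega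
      have hspec := PySem.Chars.find_spec (s := low) (sub := sig.toList) hnn
      have hle : (PySem.Chars.find low sig.toList).toNat ≤ m := by
        by_contra hlt
        exact hspec.2 m (by omega) hpre
      have hgem : (m : Int) ≤ PySem.Chars.find low sig.toList := by
        rcases not_and_or.mp h1 with h | h
        · exact absurd hne h
        · omega
      have heq : PySem.Chars.find low sig.toList = (m : Int) := by omega
      simp [fuScan, hp, heq]
    · -- no match at position m: still unrecorded after m + 1 steps
      have hstill : ¬ (PySem.Chars.find low sig.toList ≠ -1 ∧ PySem.Chars.find low sig.toList < (m : Int) + 1) := by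
        rintro ⟨hne, hlt⟩
        have hnn : 0 ≤ PySem.Chars.find low sig.toList := by omega
        have hspec := PySem.Chars.find_spec (s := low) (sub := sig.toList) hnn
        have heq : (PySem.Chars.find low sig.toList).toNat = m := by
          rcases not_and_or.mp h1 with h | h
          · exact absurd hne h
          · omega
        exact hp (List.isPrefixOf_iff_prefix.mpr (heq ▸ hspec.1))
      simp only [fuScan, hp, Bool.and_false, Bool.false_eq_true, if_false]
      rw [if_neg (by push_cast; exact hstill)]

theorem zipWith_map_selfR {α β γ : Type} (f : α → β → γ) (g : α → β) :
    ∀ l : List α, List.zipWith f l (l.map g) = l.map (fun x => f x (g x)) := by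
  intro l; induction l with
  | nil => rfl
  | cons x xs ih => simp [ih]

theorem fuScan_zero (low : List Char) (sig : String) : fuScan low 0 sig = none := by
  have := PySem.Chars.neg_one_le_find low sig.toList
  simp only [fuScan, Nat.cast_zero]
  rw [if_neg (by omega)]

-- outer scan invariant: after m positions the state is exactly the fuScan table
theorem outer_fold_eq (low : List Char) (m : Nat) :
    (PySem.List.pyRange 0 (m : Int) 1).foldl
      (fun st i =>
        (PySem.List.enumerate consentSigs 0).foldl
          (fun st p =>
            if (PySem.List.pyGetD st p.1 none).isNone
                && p.2.toList.isPrefixOf (low.drop i.toNat)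
            then PySem.List.pySetD st p.1 (some i) else st)
          st)
      (List.replicate consentSigs.length none)
    = consentSigs.map (fuScan low m) := by
  induction m with
  | zero =>
    rw [Nat.cast_zero, PySem.List.pyRange_one_eq_nil (le_refl 0), List.foldl_nil]
    rw [List.map_congr_left (fun sig _ => fuScan_zero low sig)]
    simp [List.map_const']
  | succ m ih =>
    rw [show ((m + 1 : Nat) : Int) = (m : Int) + 1 by push_cast; ring]
    rw [PySem.List.pyRange_one_succ_right (by positivity), List.foldl_append, List.foldl_cons, List.foldl_nil]
    rw [ih]
    have hinner := inner_fold_eq low (m : Int) consentSigs [] (consentSigs.map (fuScan low m)) (by simp)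
    simp only [List.nil_append, List.length_nil, Nat.cast_zero] at hinner
    rw [hinner, zipWith_map_selfR]
    refine List.map_congr_left (fun sig _ => ?_)
    have := fuScan_step low m sig
    simpa using this

theorem fuScan_final (low : List Char) (sig : String) (hne : sig.toList ≠ []) :
    fuScan low low.length sig =
      if PySem.Chars.find low sig.toList ≠ -1 then some (PySem.Chars.find low sig.toList) else none := by
  have hge := PySem.Chars.neg_one_le_find low sig.toList
  by_cases h1 : PySem.Chars.find low sig.toList ≠ -1
  · have hlt := find_toNat_lt low sig hne h1
    have hnn : 0 ≤ PySem.Chars.find low sig.toList := by omega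
    rw [fuScan, if_pos ⟨h1, by omega⟩, if_pos h1]
  · simp [fuScan, h1]

-- B's counting loop over the zipped pairs, as two countP's
theorem count_fold_eq (f : String → Option Int) (l : List String) (ph th : Int) :
    (l.zip (l.map f)).foldl
      (fun (acc : Int × Int) p =>
        match p.2 with
        | some start =>
          (if start + PySem.Str.len p.1 ≤ 200 then acc.1 + 1 else acc.1, acc.2 + 1)
        | none => acc)
      (ph, th)
    = (ph + (l.countP (fun s => (f s).isSome &&
          decide ((f s).getD 0 + ((PySem.Str.len s) : Int) ≤ 200)) : Int),
       th + (l.countP (fun s => (f s).isSome) : Int)) := by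
  induction l generalizing ph th with
  | nil => simp
  | cons x xs ih =>
    simp only [List.map_cons, List.zip_cons_cons, List.foldl_cons, List.countP_cons]
    cases hfx : f x with
    | none =>
      rw [ih]
      simp
    | some start =>
      simp only
      rw [ih]
      simp
      refine ⟨by split_ifs <;> ring, ?_⟩
      ring

theorem sigs_nonempty : ∀ s ∈ consentSigs, s.toList ≠ [] := by decide

-- the two prefix-count predicates agree on every signature
theorem prefix_pred_eq (low : List Char) (s : String) (hne : s.toList ≠ []) :
    ((fuScan low low.length s).isSome &&
        decide ((fuScan low low.length s).getD 0 + ((PySem.Str.len s) : Int) ≤ 200))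
      = PySem.Chars.isIn s.toList (low.take 200) := by
  rw [fuScan_final low s hne]
  rw [Bool.eq_iff_iff]
  rw [show (PySem.Chars.isIn s.toList (low.take 200) = true) ↔
        (PySem.Chars.find low s.toList ≠ -1 ∧
          PySem.Chars.find low s.toList + s.toList.length ≤ 200) from isIn_take_iff low s.toList 200]
  by_cases h : PySem.Chars.find low s.toList = -1 <;>
    simp [h, PySem.Str.len_eq]

theorem total_pred_eq (low : List Char) (s : String) (hne : s.toList ≠ []) :
    (fuScan low low.length s).isSome = PySem.Chars.isIn s.toList low := by
  rw [fuScan_final low s hne, isIn_total_eq]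
  by_cases h : PySem.Chars.find low s.toList = -1 <;> simp [h]

-- ===== VERDICT (by name: the statement is the Claim_ definition above) =====
theorem is_consent_text_py_spec : Claim_equal_is_consent_text_py := by
  intro text _
  unfold Spec_is_consent_text_py
  cases text with
  | none => rfl
  | some t =>
    simp only [is_consent_text_py, is_consent_text_py_alt]
    by_cases h0 : PySem.Str.len t = 0
    · rw [if_pos h0, if_pos h0]
    · simp only [h0, if_false]
      set low := PySem.Chars.lower t.toList with hlow
      have hlt : (PySem.Str.lower t).toList = low := by
        simp [PySem.Str.lower, hlow]
      have hlen : PySem.Str.len (PySem.Str.lower t) = (low.length : Int) := by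
        rw [PySem.Str.len_eq, hlt]
      -- A side: slice → take, 0/1-sums → countP
      rw [show PySem.Str.slice (PySem.Str.lower t) none (some 200)
            = String.ofList (low.take 200) from by
        simp only [PySem.Str.slice]
        rw [hlt]
        show String.ofList (PySem.List.slice low none (some 200)) = _
        rw [PySem.List.slice_to _ (by norm_num)]
        simp]
      simp only [PySem.Str.isIn_eq, String.toList_ofList, hlt]
      rw [PySem.List.foldl_if_add_one, PySem.List.foldl_if_add_one]
      -- B side: solve the scan, then the counting loop
      rw [hlen]
      have houter := outer_fold_eq low low.length
      simp only [hlt] at *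
      rw [houter, count_fold_eq (fuScan low low.length) consentSigs 0 0]
      -- identify the two pairs of counts
      have h1 : List.countP (fun s => (fuScan low low.length s).isSome &&
            decide ((fuScan low low.length s).getD 0 + ((PySem.Str.len s) : Int) ≤ 200)) consentSigs
          = List.countP (fun s => PySem.Chars.isIn s.toList (List.take 200 low)) consentSigs :=
        List.countP_congr (fun s hs => by rw [prefix_pred_eq low s (sigs_nonempty s hs)])
      have h2 : List.countP (fun s => (fuScan low low.length s).isSome) consentSigs
          = List.countP (fun s => PySem.Chars.isIn s.toList low) consentSigs :=
        List.countP_congr (fun s hs => by rw [total_pred_eq low s (sigs_nonempty s hs)])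
      rw [h1, h2]
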